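-- pv_equiv track=rewrite | github.com/Wessias/PythonMathShizniz | pythonIntroLab2.py | freqOfSingDigitsInList
-- ===== SOURCE A (Python) =====
-- def freqOfSingDigitsInList(listToCheck):
--
--     digFreqTracker = []
--     for i in range(0, 10):
--         digFreqTracker.append([i,0]) #Populate list with lists where the lists within are in the form (digit, digitCounter)
--
--     for curDig in listToCheck:
--         for i in range(0, 10):
--             if (curDig == i):
--                 digFreqTracker[i][1] += 1
--                 break
--
--
--
--
--     return digFreqTracker
-- ===== SOURCE B (Python) =====
-- def freqOfSingDigitsInList(listToCheck):
--     return [[i, listToCheck.count(i)] for i in range(10)]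
-- ===== Notes on version B (the rewrite author's own statement) =====
-- stated objective: idiomatic
-- what changed: Replaces A's per-element pass with an inner break-loop by a one-line comprehension over the ten digits that tallies each with list.count, inverting the loop nesting.
import Mathlib
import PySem

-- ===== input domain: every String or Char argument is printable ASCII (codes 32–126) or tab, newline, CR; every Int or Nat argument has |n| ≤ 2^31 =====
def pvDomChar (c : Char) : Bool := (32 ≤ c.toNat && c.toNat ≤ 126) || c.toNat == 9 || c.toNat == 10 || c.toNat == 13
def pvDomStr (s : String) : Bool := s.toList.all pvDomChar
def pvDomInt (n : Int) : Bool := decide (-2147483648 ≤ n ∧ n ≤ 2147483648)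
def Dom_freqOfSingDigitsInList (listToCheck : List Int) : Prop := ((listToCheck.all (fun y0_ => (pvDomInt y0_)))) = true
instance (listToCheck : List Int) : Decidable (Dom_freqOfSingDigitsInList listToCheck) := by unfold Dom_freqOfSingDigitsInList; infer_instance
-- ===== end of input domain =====

-- B replaces A's per-element inner break-loop by a ten-digit comprehension using list.count (idiomatic; same value on every input).


-- ===== PORT A =====
-- the inner 'for i in range(0,10): if curDig == i: tracker[i][1] += 1; break' loop;
-- i ranges over 0..9 so i.toNat is exact (no negative index reaches it)
def pvInnerA (curDig : Int) (tracker : List (List Int)) : List Int → List (List Int)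
  | [] => tracker
  | i :: rest =>
    if curDig == i then tracker.modify i.toNat (fun row => row.modify 1 (· + 1))
    else pvInnerA curDig tracker rest

def freqOfSingDigitsInList (listToCheck : List Int) : List (List Int) :=
  let digFreqTracker := (PySem.List.pyRange 0 10 1).foldl (fun acc i => acc ++ [[i, (0 : Int)]]) []
  listToCheck.foldl (fun tracker curDig => pvInnerA curDig tracker (PySem.List.pyRange 0 10 1)) digFreqTracker

-- ===== PORT B =====
def freqOfSingDigitsInList_alt (listToCheck : List Int) : List (List Int) :=
  (PySem.List.pyRange 0 10 1).map (fun i => [i, (PySem.List.count listToCheck i : Int)])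

-- ===== PRECONDITION & SPEC =====
def Spec_freqOfSingDigitsInList (listToCheck : List Int) (out : List (List Int)) : Prop := out = freqOfSingDigitsInList_alt listToCheck
instance (listToCheck : List Int) (out : List (List Int)) : Decidable (Spec_freqOfSingDigitsInList listToCheck out) := by unfold Spec_freqOfSingDigitsInList; infer_instance

-- ===== CLAIM (what is proved, stated in full; the proofs are below) =====
def Claim_equal_freqOfSingDigitsInList : Prop := ∀ (listToCheck : List Int), Dom_freqOfSingDigitsInList listToCheck → Spec_freqOfSingDigitsInList listToCheck (freqOfSingDigitsInList listToCheck)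

-- ===== LEMMAS AND PROOFS =====

theorem pvRange10 : PySem.List.pyRange 0 10 1 = [0,1,2,3,4,5,6,7,8,9] := by decide

-- invariant of A's main loop: the tracker stays in shape [[i, cᵢ]] and each step adds the head's count
theorem pvStepA (d : Int) (a0 a1 a2 a3 a4 a5 a6 a7 a8 a9 : Int) :
    pvInnerA d [[0,a0],[1,a1],[2,a2],[3,a3],[4,a4],[5,a5],[6,a6],[7,a7],[8,a8],[9,a9]] [0,1,2,3,4,5,6,7,8,9]
    = [[0, a0 + (if d = 0 then 1 else 0)],[1, a1 + (if d = 1 then 1 else 0)],[2, a2 + (if d = 2 then 1 else 0)],[3, a3 + (if d = 3 then 1 else 0)],[4, a4 + (if d = 4 then 1 else 0)],[5, a5 + (if d = 5 then 1 else 0)],[6, a6 + (if d = 6 then 1 else 0)],[7, a7 + (if d = 7 then 1 else 0)],[8, a8 + (if d = 8 then 1 else 0)],[9, a9 + (if d = 9 then 1 else 0)]] := by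
  by_cases h0 : d = 0
  · subst h0; simp [pvInnerA, List.modify]
  by_cases h1 : d = 1
  · subst h1; simp [pvInnerA, List.modify]
  by_cases h2 : d = 2
  · subst h2; simp [pvInnerA, List.modify]
  by_cases h3 : d = 3
  · subst h3; simp [pvInnerA, List.modify]
  by_cases h4 : d = 4
  · subst h4; simp [pvInnerA, List.modify]
  by_cases h5 : d = 5
  · subst h5; simp [pvInnerA, List.modify]
  by_cases h6 : d = 6
  · subst h6; simp [pvInnerA, List.modify]
  by_cases h7 : d = 7
  · subst h7; simp [pvInnerA, List.modify]
  by_cases h8 : d = 8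
  · subst h8; simp [pvInnerA, List.modify]
  by_cases h9 : d = 9
  · subst h9; simp [pvInnerA, List.modify]
  simp [pvInnerA, h0, h1, h2, h3, h4, h5, h6, h7, h8, h9]

theorem pvStateA (l : List Int) : ∀ (a0 a1 a2 a3 a4 a5 a6 a7 a8 a9 : Int),
    l.foldl (fun tracker curDig => pvInnerA curDig tracker (PySem.List.pyRange 0 10 1))
      [[0,a0],[1,a1],[2,a2],[3,a3],[4,a4],[5,a5],[6,a6],[7,a7],[8,a8],[9,a9]]
    = [[0, a0 + l.count 0],[1, a1 + l.count 1],[2, a2 + l.count 2],[3, a3 + l.count 3],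
       [4, a4 + l.count 4],[5, a5 + l.count 5],[6, a6 + l.count 6],[7, a7 + l.count 7],
       [8, a8 + l.count 8],[9, a9 + l.count 9]] := by
  induction l with
  | nil => intro a0 a1 a2 a3 a4 a5 a6 a7 a8 a9; simp
  | cons d rest ih =>
    intro a0 a1 a2 a3 a4 a5 a6 a7 a8 a9
    rw [List.foldl_cons]
    rw [show pvInnerA d [[0,a0],[1,a1],[2,a2],[3,a3],[4,a4],[5,a5],[6,a6],[7,a7],[8,a8],[9,a9]]
          (PySem.List.pyRange 0 10 1)
        = pvInnerA d [[0,a0],[1,a1],[2,a2],[3,a3],[4,a4],[5,a5],[6,a6],[7,a7],[8,a8],[9,a9]]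
          [0,1,2,3,4,5,6,7,8,9] from by rw [pvRange10]]
    rw [pvStepA, ih]
    have hc : ∀ i : Int, ((d :: rest).count i : Int) = (rest.count i : Int) + (if d = i then 1 else 0) := by
      intro i
      by_cases h : d = i
      · simp [h]
      · simp [h]
    simp only [hc, List.cons.injEq, and_true, true_and]
    refine ⟨?_, ?_, ?_, ?_, ?_, ?_, ?_, ?_, ?_, ?_⟩ <;> (split_ifs <;> omega)

-- ===== VERDICT (by name: the statement is the Claim_ definition above) =====
theorem freqOfSingDigitsInList_spec : Claim_equal_freqOfSingDigitsInList := by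
  intro l _
  show freqOfSingDigitsInList l = freqOfSingDigitsInList_alt l
  unfold freqOfSingDigitsInList freqOfSingDigitsInList_alt
  rw [pvRange10]
  simpa [PySem.List.count] using pvStateA l 0 0 0 0 0 0 0 0 0 0
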